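-- pv_equiv track=rewrite | github.com/PZ-Nauka/LiczbaNaSlowo | liczbaNaSlowov1.py | readNumberSegment
-- ===== SOURCE A (Python) =====
-- ones = ["", "jeden", "dwa", "trzy", "cztery", "piec", "szesc", "siedem", "osiem", "dziewiec"]
--
-- tens = ["", "dziesiec", "dwadziescia", "trzydziesci", "czterdziesci", "piecdziesiat", "szescdziesiat", "siedemdziesiat", "osiemdziesiat", "dziewiecdziesiat"]
--
-- hundreds = ["", "sto", "dwiescie", "trzysta", "czterysta", "piecset", "szescset", "siedemset", "osiemset", "dziewiecset"]
--
-- teens = {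
--     10: "dziesiec",
--     11: "jedenascie",
--     12: "dwanascie",
--     13: "trzynascie",
--     14: "czternascie",
--     15: "pietnascie",
--     16: "szesnascie",
--     17: "siedemnascie",
--     18: "osiemnascie",
--     19: "dziewietnascie"
-- }
--
-- def readNumberSegment(number):
--     segment = ""
--
--     while number > 0:
--         if number >= 100:
--             segment += hundreds[int(number / 100)]
--             number = number % 100
--
--         elif number >= 20:
--             segment += tens[int(number / 10)]
--             number = number % 10
--
--         elif number >= 10:
--             segment += teens[number]
--             number -= number
--
--         elif number >= 1:
--             segment += ones[number]
--             number -= number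
--
--         segment += " "
--
--     return segment.rstrip(" ")
-- ===== SOURCE B (Python) =====
-- ones = ["", "jeden", "dwa", "trzy", "cztery", "piec", "szesc", "siedem", "osiem", "dziewiec"]
-- tens = ["", "dziesiec", "dwadziescia", "trzydziesci", "czterdziesci", "piecdziesiat", "szescdziesiat", "siedemdziesiat", "osiemdziesiat", "dziewiecdziesiat"]
-- hundreds = ["", "sto", "dwiescie", "trzysta", "czterysta", "piecset", "szescset", "siedemset", "osiemset", "dziewiecset"]
-- teens = {10: "dziesiec", 11: "jedenascie", 12: "dwanascie", 13: "trzynascie", 14: "czternascie",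
--          15: "pietnascie", 16: "szesnascie", 17: "siedemnascie", 18: "osiemnascie", 19: "dziewietnascie"}
--
-- def readNumberSegment(number):
--     if number <= 0:
--         return ""
--     h = int(number // 100)
--     rem = number % 100
--     words = [hundreds[h]]
--     if 10 <= rem <= 19:
--         words.append(teens[rem])
--     else:
--         words.append(tens[int(rem // 10)])
--         words.append(ones[int(rem % 10)])
--     return " ".join(w for w in words if w)
-- ===== Notes on version B (the rewrite author's own statement) =====
-- stated objective: idiomatic
-- what changed: Replaces A's while loop with mutable segment/number state by a direct positional decomposition (hundreds digit and 0-99 remainder computed once, words collected and joined with ' '.join); Pre_ excludes number >= 1000, where A raises IndexError on the hundreds table.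
import Mathlib
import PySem

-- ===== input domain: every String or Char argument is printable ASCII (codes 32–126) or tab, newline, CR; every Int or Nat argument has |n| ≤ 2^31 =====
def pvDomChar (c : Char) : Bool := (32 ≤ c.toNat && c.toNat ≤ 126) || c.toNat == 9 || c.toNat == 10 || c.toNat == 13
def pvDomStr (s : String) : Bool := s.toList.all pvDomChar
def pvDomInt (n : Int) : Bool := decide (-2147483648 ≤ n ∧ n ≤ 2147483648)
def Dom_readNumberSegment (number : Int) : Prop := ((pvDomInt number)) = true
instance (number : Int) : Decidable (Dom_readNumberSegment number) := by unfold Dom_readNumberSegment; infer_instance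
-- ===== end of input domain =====

-- B replaces A's while loop by a direct positional decomposition (hundreds digit and the
-- 0–99 remainder looked up once each) joining the nonempty words: idiomatic, no loop state.

-- shared module-level tables (verbatim from the Python module)
def onesL : List String := ["", "jeden", "dwa", "trzy", "cztery", "piec", "szesc", "siedem", "osiem", "dziewiec"]
def tensL : List String := ["", "dziesiec", "dwadziescia", "trzydziesci", "czterdziesci", "piecdziesiat", "szescdziesiat", "siedemdziesiat", "osiemdziesiat", "dziewiecdziesiat"]
def hundredsL : List String := ["", "sto", "dwiescie", "trzysta", "czterysta", "piecset", "szescset", "siedemset", "osiemset", "dziewiecset"]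
def teensD : PySem.Dict Int String := PySem.Dict.ofList
  [(10, "dziesiec"), (11, "jedenascie"), (12, "dwanascie"), (13, "trzynascie"), (14, "czternascie"),
   (15, "pietnascie"), (16, "szesnascie"), (17, "siedemnascie"), (18, "osiemnascie"), (19, "dziewietnascie")]

-- ===== PORT A =====
-- the while loop, over the segment as a char list (PySem.Chars bridge; '+=' is list append).
-- fuel = number.toNat + 1 bounds the iterations (number strictly decreases every pass), so
-- inside Pre_ the loop runs exactly as in Python.  The list/dict lookups use .getD "" — the
-- out-of-range index is excluded by Pre_ (Python raises IndexError there).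
def readNumberSegmentLoop : Nat → Int → List Char → List Char
  | 0, _, segment => segment
  | fuel + 1, number, segment =>
    if number > 0 then
      if number ≥ 100 then
        readNumberSegmentLoop fuel (PySem.Int.mod number 100)
          (segment ++ ((PySem.List.pyGet? hundredsL (PySem.Int.floordiv number 100)).getD "").toList ++ [' '])
      else if number ≥ 20 then
        readNumberSegmentLoop fuel (PySem.Int.mod number 10)
          (segment ++ ((PySem.List.pyGet? tensL (PySem.Int.floordiv number 10)).getD "").toList ++ [' '])
      else if number ≥ 10 then
        readNumberSegmentLoop fuel (number - number)
          (segment ++ ((teensD.get? number).getD "").toList ++ [' '])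
      else if number ≥ 1 then
        readNumberSegmentLoop fuel (number - number)
          (segment ++ ((PySem.List.pyGet? onesL number).getD "").toList ++ [' '])
      else
        readNumberSegmentLoop fuel number (segment ++ [' '])
    else segment

-- segment.rstrip(" ") : drop trailing ' ' characters only (exact)
def rstripSpace (cs : List Char) : List Char := (cs.reverse.dropWhile (· == ' ')).reverse

def readNumberSegment (number : Int) : String :=
  String.ofList (rstripSpace (readNumberSegmentLoop (number.toNat + 1) number []))

-- ===== PORT B =====
-- the words for the 0–99 remainder (teens looked up as a dict, else tens digit + ones digit)
def tailWords (rem : Int) : List String :=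
  if 10 ≤ rem ∧ rem ≤ 19 then [(teensD.get? rem).getD ""]
  else [(PySem.List.pyGet? tensL (PySem.Int.floordiv rem 10)).getD "",
        (PySem.List.pyGet? onesL (PySem.Int.mod rem 10)).getD ""]

def readNumberSegment_alt (number : Int) : String :=
  if number ≤ 0 then ""
  else
    let words := [(PySem.List.pyGet? hundredsL (PySem.Int.floordiv number 100)).getD ""] ++
                 tailWords (PySem.Int.mod number 100)
    PySem.Str.join " " (words.filter (· ≠ ""))

-- ===== PRECONDITION & SPEC =====
-- Pre_ excludes number ≥ 1000, where the Python A raises IndexError (hundreds index > 9);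
-- A returns normally on every number ≤ 999 (non-positive numbers give "").
def Pre_readNumberSegment (number : Int) : Prop := number ≤ 999
instance (number : Int) : Decidable (Pre_readNumberSegment number) := by unfold Pre_readNumberSegment; infer_instance
def pvWitness_readNumberSegment : Int := 215

def Spec_readNumberSegment (number : Int) (out : String) : Prop := out = readNumberSegment_alt number
instance (number : Int) (out : String) : Decidable (Spec_readNumberSegment number out) := by unfold Spec_readNumberSegment; infer_instance

-- ===== CLAIM (what is proved, stated in full; the proofs are below) =====
def Claim_equal_readNumberSegment : Prop := ∀ (number : Int), Dom_readNumberSegment number → Pre_readNumberSegment number → Spec_readNumberSegment number (readNumberSegment number)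

-- ===== LEMMAS AND PROOFS =====

theorem loop_nonpos (f : Nat) (n : Int) (s : List Char) (h : ¬ n > 0) :
    readNumberSegmentLoop f n s = s := by
  cases f <;> simp [readNumberSegmentLoop, h]

-- the segment accumulator is a pure prefix
theorem loop_prefix (f : Nat) : ∀ (n : Int) (s : List Char),
    readNumberSegmentLoop f n s = s ++ readNumberSegmentLoop f n [] := by
  induction f with
  | zero => intro n s; simp [readNumberSegmentLoop]
  | succ f ih =>
    intro n s
    by_cases h0 : n > 0
    · simp only [readNumberSegmentLoop, if_pos h0]
      split_ifs with h1 h2 h3 h4 <;>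
        (rw [ih]; conv_rhs => rw [ih]) <;> simp [List.append_assoc]
    · simp [readNumberSegmentLoop, h0]

-- the result does not depend on the fuel once it exceeds the start value
theorem loop_fuel (f : Nat) : ∀ (g : Nat) (n : Int) (s : List Char),
    n.toNat < f → n.toNat < g →
    readNumberSegmentLoop f n s = readNumberSegmentLoop g n s := by
  induction f with
  | zero => intro g n s hf _; exact absurd hf (Nat.not_lt_zero _)
  | succ f ih =>
    intro g n s hf hg
    obtain ⟨g', rfl⟩ : ∃ g', g = g' + 1 := ⟨g - 1, by omega⟩
    by_cases h0 : n > 0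
    · have h100 := PySem.Int.mod_nonneg (a := n) (b := 100) (by norm_num)
      have h100' := PySem.Int.mod_lt (a := n) (b := 100) (by norm_num)
      have h10 := PySem.Int.mod_nonneg (a := n) (b := 10) (by norm_num)
      have h10' := PySem.Int.mod_lt (a := n) (b := 10) (by norm_num)
      simp only [readNumberSegmentLoop, if_pos h0]
      split_ifs with h1 h2 h3 h4
      · exact ih _ _ _ (by omega) (by omega)
      · exact ih _ _ _ (by omega) (by omega)
      · exact ih _ _ _ (by omega) (by omega)
      · exact ih _ _ _ (by omega) (by omega)
      · omega
    · rw [loop_nonpos _ _ _ h0, loop_nonpos _ _ _ h0]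

theorem rstripSpace_append (x y : List Char) :
    rstripSpace (x ++ y) =
      if rstripSpace y = [] then rstripSpace x else x ++ rstripSpace y := by
  unfold rstripSpace
  rw [List.reverse_append, List.dropWhile_append]
  by_cases h : (y.reverse.dropWhile (· == ' ')) = []
  · simp [h]
  · simp [h, List.isEmpty_iff, List.reverse_append]

-- B's tail rendering of the 0–99 remainder, as the char suffix it contributes after a word
def tailChars (rem : Int) : List Char :=
  if (tailWords rem).filter (· ≠ "") = [] then []
  else ' ' :: (PySem.Str.join " " ((tailWords rem).filter (· ≠ ""))).toList

-- A's loop on the 0–99 remainder produces exactly B's tail (checked exhaustively)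
set_option maxRecDepth 100000 in
set_option maxHeartbeats 1000000 in
theorem bridge : ∀ r : Fin 100,
    rstripSpace (' ' :: readNumberSegmentLoop 100 ((r : Nat) : Int) []) = tailChars ((r : Nat) : Int) := by
  decide

-- the whole statement for 1 ≤ n ≤ 99 (no hundreds word), checked exhaustively
set_option maxRecDepth 100000 in
set_option maxHeartbeats 1000000 in
theorem eq_small : ∀ k : Fin 99,
    readNumberSegment ((k : Nat) + 1 : Int) = readNumberSegment_alt ((k : Nat) + 1 : Int) := by
  decide

theorem toList_injS {a b : String} (h : a.toList = b.toList) : a = b := by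
  have := congrArg String.ofList h
  simpa using this

theorem join_cons_ne_nil (w t : String) (ws : List String) :
    PySem.Str.join " " (w :: t :: ws) = w ++ " " ++ PySem.Str.join " " (t :: ws) := by
  apply toList_injS
  simp [PySem.Str.join, PySem.Chars.join_cons_cons]

theorem joinS_singleton (w : String) : PySem.Str.join " " [w] = w := by
  apply toList_injS
  simp [PySem.Str.join, PySem.Chars.join_singleton]

-- assembling the hundreds word with the tail, for any hundreds word with no spaces in play
theorem combine (H : String) (r : Int)
    (hne : decide (H ≠ "") = true)
    (hstrip : rstripSpace H.toList = H.toList)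
    (hbr : rstripSpace (' ' :: readNumberSegmentLoop 100 r []) = tailChars r) :
    String.ofList (rstripSpace (H.toList ++ [' '] ++ readNumberSegmentLoop 100 r [])) =
      PySem.Str.join " " (([H] ++ tailWords r).filter (· ≠ "")) := by
  have hsplit : H.toList ++ [' '] ++ readNumberSegmentLoop 100 r [] =
      H.toList ++ (' ' :: readNumberSegmentLoop 100 r []) := by simp
  rw [hsplit, rstripSpace_append, hbr, List.singleton_append]
  simp only [List.filter_cons, hne, if_true]
  unfold tailChars
  by_cases htw : (tailWords r).filter (· ≠ "") = []
  · simp only [htw]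
    rw [hstrip]
    simp [joinS_singleton]
  · obtain ⟨t, ws, hws⟩ : ∃ t ws, (tailWords r).filter (· ≠ "") = t :: ws := by
      rcases hL : (tailWords r).filter (· ≠ "") with _ | ⟨t, ws⟩
      · exact absurd hL htw
      · exact ⟨t, ws, rfl⟩
    rw [hws]
    rw [if_neg (by simp)]
    rw [join_cons_ne_nil]
    apply toList_injS
    simp

theorem eq_big (n : Int) (hlo : 100 ≤ n) (hhi : n ≤ 999) :
    readNumberSegment n = readNumberSegment_alt n := by
  have hr0 := PySem.Int.mod_nonneg (a := n) (b := 100) (by norm_num)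
  have hr1 := PySem.Int.mod_lt (a := n) (b := 100) (by norm_num)
  have hsum := PySem.Int.floordiv_mul_add_mod n 100
  -- A: peel the first loop iteration, then normalise the fuel of the rest
  have hA : readNumberSegment n =
      String.ofList (rstripSpace
        ((((PySem.List.pyGet? hundredsL (PySem.Int.floordiv n 100)).getD "").toList ++ [' ']) ++
          readNumberSegmentLoop 100 (PySem.Int.mod n 100) [])) := by
    have hstep : readNumberSegmentLoop (n.toNat + 1) n [] =
        readNumberSegmentLoop n.toNat (PySem.Int.mod n 100)
          ([] ++ ((PySem.List.pyGet? hundredsL (PySem.Int.floordiv n 100)).getD "").toList ++ [' ']) := by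
      simp only [readNumberSegmentLoop, if_pos (by omega : n > 0), if_pos (by omega : n ≥ 100)]
    rw [readNumberSegment, hstep, loop_prefix,
        loop_fuel n.toNat 100 (PySem.Int.mod n 100) _ (by omega) (by omega)]
    simp [List.append_assoc]
  -- lift the bridge lemma from Fin 100 to the remainder
  have hbr : rstripSpace (' ' :: readNumberSegmentLoop 100 (PySem.Int.mod n 100) []) =
      tailChars (PySem.Int.mod n 100) := by
    have hx : ∃ k : Fin 100, PySem.Int.mod n 100 = ((k : Nat) : Int) :=
      ⟨⟨(PySem.Int.mod n 100).toNat, by omega⟩, by simp; omega⟩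
    obtain ⟨k, hk⟩ := hx
    rw [hk]
    exact bridge k
  rw [hA, readNumberSegment_alt, if_neg (by omega : ¬ n ≤ 0)]
  rw [List.append_assoc] at hA ⊢
  rw [show ([' '] ++ readNumberSegmentLoop 100 (PySem.Int.mod n 100) []) =
        (' ' :: readNumberSegmentLoop 100 (PySem.Int.mod n 100) []) from rfl]
  have hhb : 1 ≤ PySem.Int.floordiv n 100 ∧ PySem.Int.floordiv n 100 ≤ 9 := by
    constructor <;> omega
  obtain ⟨hb1, hb9⟩ := hhb
  -- the hundreds word: nine concrete possibilities, all nonempty and space-free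
  have hcomb := combine ((PySem.List.pyGet? hundredsL (PySem.Int.floordiv n 100)).getD "")
      (PySem.Int.mod n 100) ?hne ?hstrip hbr
  case hne =>
    interval_cases (PySem.Int.floordiv n 100) <;> decide
  case hstrip =>
    interval_cases (PySem.Int.floordiv n 100) <;> decide
  · rw [← hcomb]
    simp [List.append_assoc]

-- ===== VERDICT (by name: the statement is the Claim_ definition above) =====
theorem readNumberSegment_spec : Claim_equal_readNumberSegment := by
  intro n _ hpre
  have hpre' : n ≤ 999 := hpre
  unfold Spec_readNumberSegment
  rcases (show n ≤ 0 ∨ (1 ≤ n ∧ n ≤ 99) ∨ 100 ≤ n by omega) with h | h | h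
  · rw [readNumberSegment, loop_nonpos _ _ _ (by omega), readNumberSegment_alt, if_pos h]
    simp [rstripSpace]
  · obtain ⟨k, rfl⟩ : ∃ k : Fin 99, n = ((k : Nat) + 1 : Int) :=
      ⟨⟨n.toNat - 1, by omega⟩, by simp; omega⟩
    exact eq_small k
  · exact eq_big n h hpre'
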